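-- pv_equiv track=rewrite | github.com/pequnio3/cs173project | scripts/featureExtraction.py | kmerToPos
-- ===== SOURCE A (Python) =====
-- def kmerToPos(min_k,seq):
--     n= len(seq)
--     loc=0
--     for i in range(min_k,n):
--         loc+= pow(4,i)
--     for i in range(0,n):
--         place = (n-1)-i
--         if seq[place] == 'A':
--             loc += pow(4,i)* 0
--         elif seq[place] == 'T':
--             loc += pow(4,i) *1
--         elif seq[place] == 'G':
--             loc += pow(4,i) *2
--         else:
--             loc += pow(4,i) *3
--     return loc
-- ===== SOURCE B (Python) =====
-- _CODE = {'A': 0, 'T': 1, 'G': 2}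
--
-- def kmerToPos(min_k, seq):
--     n = len(seq)
--     # closed-form geometric sum for the offset: sum_{i=min_k}^{n-1} 4^i
--     offset = (4 ** n - 4 ** min_k) // 3 if min_k < n else 0
--     # Horner scan: one running multiply per character instead of pow() each step
--     val = 0
--     for c in seq:
--         val = 4 * val + _CODE.get(c, 3)
--     return offset + val
-- ===== Notes on version B (the rewrite author's own statement) =====
-- stated objective: faster
-- what changed: replaces the per-iteration pow(4,i) calls in both loops by a closed-form geometric sum (4**n - 4**min_k)//3 for the offset and a single forward Horner scan (val = 4*val + code) for the encoding
-- outside the precondition, e.g. on kmerToPos(-1, ''): A returns 0.25, B returns 0.0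
import Mathlib
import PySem

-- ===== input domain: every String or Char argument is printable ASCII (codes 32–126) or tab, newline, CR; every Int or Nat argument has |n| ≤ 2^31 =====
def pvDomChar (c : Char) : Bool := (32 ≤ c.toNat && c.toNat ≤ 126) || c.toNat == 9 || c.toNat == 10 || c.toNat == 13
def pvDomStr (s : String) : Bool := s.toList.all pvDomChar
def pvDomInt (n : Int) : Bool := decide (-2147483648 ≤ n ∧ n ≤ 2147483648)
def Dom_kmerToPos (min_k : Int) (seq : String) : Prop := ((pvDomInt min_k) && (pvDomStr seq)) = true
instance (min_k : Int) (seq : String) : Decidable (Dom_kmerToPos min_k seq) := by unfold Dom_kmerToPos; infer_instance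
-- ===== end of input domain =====

-- B replaces A's per-iteration pow(4,i) calls by a closed-form geometric sum for the
-- offset and a single Horner scan for the encoding (objective: faster).

-- ===== PORT A =====
-- pow(4,i): under Pre_ (0 ≤ min_k) every i in both ranges is ≥ 0, so 4 ^ i.toNat is exact.
-- seq[place]: place = (n-1)-i is always in range here, so pyGetD with a dummy default is exact.
def kmerToPos (min_k : Int) (seq : String) : Int :=
  let n : Int := (seq.toList.length : Int)
  let loc : Int := 0
  let loc := (PySem.List.pyRange min_k n 1).foldl (fun loc i => loc + 4 ^ i.toNat) loc
  let loc := (PySem.List.pyRange 0 n 1).foldl (fun loc i =>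
      let place := (n - 1) - i
      let c := PySem.List.pyGetD seq.toList place ' '
      if c = 'A' then loc + 4 ^ i.toNat * 0
      else if c = 'T' then loc + 4 ^ i.toNat * 1
      else if c = 'G' then loc + 4 ^ i.toNat * 2
      else loc + 4 ^ i.toNat * 3) loc
  loc

-- ===== PORT B =====
-- port of Source B's _CODE.get(c, 3)
def kmerCode (c : Char) : Int :=
  if c = 'A' then 0 else if c = 'T' then 1 else if c = 'G' then 2 else 3

def kmerToPos_alt (min_k : Int) (seq : String) : Int :=
  let n : Int := (seq.toList.length : Int)
  let offset : Int := if min_k < n then (4 ^ n.toNat - 4 ^ min_k.toNat) / 3 else 0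
  let val : Int := seq.toList.foldl (fun v c => 4 * v + kmerCode c) 0
  offset + val

-- ===== PRECONDITION & SPEC =====
-- Pre_ excludes min_k < 0: there A's pow(4, i) with a negative i makes loc a float, so A
-- returns a float, not a value of the declared int type.
def Pre_kmerToPos (min_k : Int) (seq : String) : Prop := 0 ≤ min_k
instance (min_k : Int) (seq : String) : Decidable (Pre_kmerToPos min_k seq) := by
  unfold Pre_kmerToPos; infer_instance
def pvWitness_kmerToPos : Int × String := (2, "ATG")

def Spec_kmerToPos (min_k : Int) (seq : String) (out : Int) : Prop := out = kmerToPos_alt min_k seq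
instance (min_k : Int) (seq : String) (out : Int) : Decidable (Spec_kmerToPos min_k seq out) := by unfold Spec_kmerToPos; infer_instance

-- ===== CLAIM (what is proved, stated in full; the proofs are below) =====
def Claim_equal_kmerToPos : Prop := ∀ (min_k : Int) (seq : String), Dom_kmerToPos min_k seq → Pre_kmerToPos min_k seq → Spec_kmerToPos min_k seq (kmerToPos min_k seq)

-- ===== LEMMAS AND PROOFS =====

-- 3 · Σ_{j<k} 4^(a+j) = 4^(a+k) − 4^a
theorem kmer_geom (k a : Nat) :
    3 * (((List.range k).map (fun j => (4:Int) ^ (a + j))).sum) = 4 ^ (a + k) - 4 ^ a := by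
  induction k with
  | zero => simp
  | succ k ih =>
    rw [List.range_succ, List.map_append, List.sum_append]
    simp only [List.map_cons, List.map_nil, List.sum_cons, List.sum_nil]
    rw [mul_add, ih, show a + (k + 1) = (a + k) + 1 from rfl, pow_succ]
    ring

-- A's first loop equals B's closed-form offset (for 0 ≤ a).
theorem kmer_offset (a n : Int) (ha : 0 ≤ a) (s0 : Int) :
    (PySem.List.pyRange a n 1).foldl (fun loc i => loc + 4 ^ i.toNat) s0
      = s0 + (if a < n then ((4:Int) ^ n.toNat - 4 ^ a.toNat) / 3 else 0) := by
  by_cases h : a < n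
  · rw [PySem.List.pyRange_one, List.foldl_map, PySem.List.foldl_add, if_pos h]
    have hmap : List.map (fun (y : Nat) => (4:Int) ^ (a + (y:Int)).toNat) (List.range (n - a).toNat)
        = List.map (fun j => (4:Int) ^ (a.toNat + j)) (List.range (n - a).toNat) := by
      apply List.map_congr_left
      intro j hj
      simp only [List.mem_range] at hj
      congr 1
      omega
    rw [hmap]
    have := kmer_geom (n - a).toNat a.toNat
    have hn : a.toNat + (n - a).toNat = n.toNat := by omega
    rw [hn] at this
    have h3 : ((4:Int) ^ n.toNat - 4 ^ a.toNat) / 3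
        = (3 * (((List.range (n - a).toNat).map (fun j => (4:Int) ^ (a.toNat + j))).sum)) / 3 := by
      rw [this]
    rw [h3, Int.mul_ediv_cancel_left _ (by norm_num)]
  · rw [PySem.List.pyRange_one_eq_nil (by omega), if_neg h]
    simp

-- shifting a nonnegative index past a cons cell
theorem kmer_getD_cons_shift (c : Char) (t : List Char) (k : Int)
    (h0 : 0 ≤ k) (h1 : k < (t.length : Int)) :
    PySem.List.pyGetD (c :: t) (k + 1) ' ' = PySem.List.pyGetD t k ' ' := by
  rw [PySem.List.pyGetD_eq_getElem (c :: t) ' ' (by omega) (by simp; omega),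
      PySem.List.pyGetD_eq_getElem t ' ' h0 h1]
  have hk : (k + 1).toNat = k.toNat + 1 := by omega
  simp [hk]

-- the body of A's second loop, as a function of the weight i and the character
def kmerStep (loc : Int) (i : Int) (c : Char) : Int :=
  if c = 'A' then loc + 4 ^ i.toNat * 0
  else if c = 'T' then loc + 4 ^ i.toNat * 1
  else if c = 'G' then loc + 4 ^ i.toNat * 2
  else loc + 4 ^ i.toNat * 3

theorem kmerStep_eq (loc i : Int) (c : Char) :
    kmerStep loc i c = loc + 4 ^ i.toNat * kmerCode c := by
  unfold kmerStep kmerCode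
  split_ifs <;> ring

-- Horner with an arbitrary accumulator
theorem kmer_horner (l : List Char) (a : Int) :
    l.foldl (fun v c => 4 * v + kmerCode c) a
      = a * 4 ^ l.length + l.foldl (fun v c => 4 * v + kmerCode c) 0 := by
  induction l generalizing a with
  | nil => simp
  | cons c t ih =>
    simp only [List.foldl_cons, List.length_cons]
    rw [ih (4 * a + kmerCode c), ih (4 * 0 + kmerCode c)]
    ring

-- A's second loop equals B's Horner value.
theorem kmer_value (l : List Char) (s0 : Int) :
    (PySem.List.pyRange 0 (l.length : Int) 1).foldl
        (fun loc i => kmerStep loc i (PySem.List.pyGetD l (((l.length : Int) - 1) - i) ' ')) s0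
      = s0 + l.foldl (fun v c => 4 * v + kmerCode c) 0 := by
  induction l generalizing s0 with
  | nil => simp [PySem.List.pyRange_one_eq_nil]
  | cons c t ih =>
    have hsplit : PySem.List.pyRange 0 ((c :: t).length : Int) 1
        = PySem.List.pyRange 0 (t.length : Int) 1 ++ [(t.length : Int)] := by
      have : ((c :: t).length : Int) = (t.length : Int) + 1 := by simp
      rw [this, PySem.List.pyRange_one_succ_right (by positivity)]
    rw [hsplit, List.foldl_append]
    have hbody : (PySem.List.pyRange 0 (t.length : Int) 1).foldl
          (fun loc i => kmerStep loc i (PySem.List.pyGetD (c :: t) ((((c :: t).length : Int) - 1) - i) ' ')) s0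
        = (PySem.List.pyRange 0 (t.length : Int) 1).foldl
          (fun loc i => kmerStep loc i (PySem.List.pyGetD t (((t.length : Int) - 1) - i) ' ')) s0 := by
      apply PySem.List.foldl_congr_mem
      intro acc i hi
      have hi' := (PySem.List.mem_pyRange_one).1 hi
      congr 1
      have h1 : (((c :: t).length : Int) - 1) - i = ((t.length : Int) - 1 - i) + 1 := by
        simp; ring
      rw [h1]
      exact kmer_getD_cons_shift c t _ (by omega) (by omega)
    rw [hbody, ih]
    -- last iteration: i = t.length, place = 0, character c
    simp only [List.foldl_cons, List.foldl_nil]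
    have hplace : (((c :: t).length : Int) - 1) - (t.length : Int) = 0 := by simp
    rw [hplace]
    have hget : PySem.List.pyGetD (c :: t) 0 ' ' = c := PySem.List.pyGetD_zero_cons ..
    rw [hget, kmerStep_eq]
    have hpow : ((t.length : Int)).toNat = t.length := by omega
    rw [kmer_horner t (4 * 0 + kmerCode c), hpow]
    ring

-- ===== VERDICT (by name: the statement is the Claim_ definition above) =====
theorem kmerToPos_spec : Claim_equal_kmerToPos := by
  unfold Claim_equal_kmerToPos
  intro min_k seq _ hpre
  unfold Spec_kmerToPos kmerToPos kmerToPos_alt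
  simp only
  rw [kmer_offset min_k (seq.toList.length : Int) hpre 0]
  have := kmer_value seq.toList
      ((0:Int) + (if min_k < (seq.toList.length : Int) then ((4:Int) ^ (seq.toList.length : Int).toNat - 4 ^ min_k.toNat) / 3 else 0))
  simp only [kmerStep] at this
  rw [this]
  have hn : ((seq.toList.length : Int)).toNat = seq.toList.length := by omega
  rw [hn]
  ring
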